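-- pv_equiv track=rewrite | github.com/louzounlab-microbiome/microbiome | Plot/plot_coef.py | shorten_bact_names
-- ===== SOURCE A (Python) =====
-- def pop_idx(idx, objects_to_remove_idx_from):
--     idx.reverse()
--     for obj in objects_to_remove_idx_from:
--         for i in idx:
--             obj.pop(i)
--     return objects_to_remove_idx_from
--
-- def shorten_bact_names(bacterias):
--     # extract the last meaningful name - long multi level names to the lowest level definition
--     short_bacterias_names = []
--     for f in bacterias:
--         i = 1
--         while len(f.split(";")[-i]) < 3 or f.split(";")[-i] in ['Unassigned', 'NA']:  # meaningless name
--             i += 1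
--             if i > len(f.split(";")):
--                 i -= 1
--                 break
--         short_bacterias_names.append(f.split(";")[-i].strip(" "))
--     # remove "k_bacteria" and "Unassigned" samples - irrelevant
--     k_bact_idx = []
--     for i, bact in enumerate(short_bacterias_names):
--         if bact == 'k__Bacteria' or bact == 'Unassigned':
--             k_bact_idx.append(i)
--
--     if k_bact_idx:
--         [short_bacterias_names, bacterias] = pop_idx(k_bact_idx, [short_bacterias_names, bacterias])
--
--     return short_bacterias_names, bacterias
-- ===== SOURCE B (Python) =====
-- def shorten_bact_names(bacterias):
--     # One fused pass: compute each short name, skip irrelevant ones, keep the rest.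
--     # Mutates bacterias in place (slice assignment) like the original's pop-based removal.
--     short_names = []
--     kept = []
--     for f in bacterias:
--         parts = f.split(";")
--         name = next((p for p in reversed(parts)
--                      if len(p) >= 3 and p not in ('Unassigned', 'NA')), parts[0])
--         name = name.strip(" ")
--         if name == 'k__Bacteria' or name == 'Unassigned':
--             continue
--         short_names.append(name)
--         kept.append(f)
--     bacterias[:] = kept
--     return short_names, bacterias
-- ===== Notes on version B (the rewrite author's own statement) =====
-- stated objective: simpler
-- what changed: B fuses shortening and filtering into a single pass that builds the short-name list and the kept list directly (inner scan as a first-match over the reversed split parts), eliminating A's separate index-collection pass and the reverse-and-pop helper; the caller's list is updated by slice assignment instead of repeated pops.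
import Mathlib
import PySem

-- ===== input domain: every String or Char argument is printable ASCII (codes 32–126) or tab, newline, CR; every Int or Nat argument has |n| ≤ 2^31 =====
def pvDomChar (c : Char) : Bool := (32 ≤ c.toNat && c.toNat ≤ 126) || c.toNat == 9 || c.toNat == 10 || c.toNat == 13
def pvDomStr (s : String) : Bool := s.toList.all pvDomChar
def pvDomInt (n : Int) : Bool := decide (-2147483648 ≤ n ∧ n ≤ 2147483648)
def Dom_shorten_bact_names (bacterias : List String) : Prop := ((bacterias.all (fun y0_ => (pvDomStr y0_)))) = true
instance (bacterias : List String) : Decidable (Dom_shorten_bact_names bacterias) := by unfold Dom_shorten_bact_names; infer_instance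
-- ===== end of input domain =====

-- B fuses shortening and filtering into one pass (no index-collection pass, no reverse-pop
-- helper); objective: simpler. Python A removes entries from the caller's list in place and
-- Python B mimics that with slice assignment; the equivalence proved here is about the
-- RETURN value (short names, kept bacterias).

-- ===== PORT A =====
-- obj.pop(i): the indices produced by the enumerate pass are always in range, so the
-- `none` (IndexError) arm is unreachable; it returns the object unchanged.
def popStep {α : Type} (o : List α) (i : Int) : List α :=
  match PySem.List.pop? o i with
  | some r => r.2
  | none => o

def pop_idx (idx : List Int) (objs : List (List String)) : List (List String) :=
  let idxr := idx.reverse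
  objs.map (fun obj => idxr.foldl popStep obj)

-- the `while` scan: i starts at 1; on a meaningless part, i += 1, and if i > len(parts)
-- it backs off to len(parts) and breaks (first-element fallback)
def shortenLoopA (parts : List String) (i : Nat) : Nat :=
  if PySem.Str.len (PySem.List.pyGetD parts (-(i : Int)) "") < 3 ∨
     PySem.List.pyGetD parts (-(i : Int)) "" = "Unassigned" ∨
     PySem.List.pyGetD parts (-(i : Int)) "" = "NA" then
    if parts.length < i + 1 then i else shortenLoopA parts (i + 1)
  else i
termination_by parts.length + 1 - i
decreasing_by omega

-- f.split(";") with the literal separator ";" ≠ "", so split? is always `some`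
def shortNameA (f : String) : String :=
  let parts := (PySem.Str.split? f ";").getD []
  PySem.Str.stripChars (PySem.List.pyGetD parts (-(shortenLoopA parts 1 : Int)) "") " "

def shorten_bact_names (bacterias : List String) : List String × List String :=
  let short := bacterias.foldl (fun acc f => acc ++ [shortNameA f]) []
  let kIdx := (PySem.List.enumerate short 0).foldl
      (fun acc ib => if ib.2 = "k__Bacteria" ∨ ib.2 = "Unassigned" then acc ++ [ib.1] else acc)
      ([] : List Int)
  if kIdx ≠ [] then
    match pop_idx kIdx [short, bacterias] with
    | [s, b] => (s, b)
    | _ => ([], [])   -- unreachable: pop_idx maps over a two-element list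
  else (short, bacterias)

-- ===== PORT B =====
-- next((p for p in reversed(parts) if len(p) >= 3 and p not in ('Unassigned','NA')), parts[0])
def findMeaningful (dflt : String) : List String → String
  | [] => dflt
  | p :: rest =>
    if 3 ≤ PySem.Str.len p ∧ p ≠ "Unassigned" ∧ p ≠ "NA" then p else findMeaningful dflt rest

-- parts[0]: split(";") never returns an empty list, so the default is unreachable
def shortNameB (f : String) : String :=
  let parts := (PySem.Str.split? f ";").getD []
  PySem.Str.stripChars (findMeaningful (PySem.List.pyGetD parts 0 "") parts.reverse) " "

def shorten_bact_names_alt (bacterias : List String) : List String × List String :=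
  bacterias.foldl
    (fun acc f =>
      let name := shortNameB f
      if name = "k__Bacteria" ∨ name = "Unassigned" then acc
      else (acc.1 ++ [name], acc.2 ++ [f]))
    (([], []) : List String × List String)

-- ===== PRECONDITION & SPEC =====
def Spec_shorten_bact_names (bacterias : List String) (out : List String × List String) : Prop := out = shorten_bact_names_alt bacterias
instance (bacterias : List String) (out : List String × List String) : Decidable (Spec_shorten_bact_names bacterias out) := by unfold Spec_shorten_bact_names; infer_instance

-- ===== CLAIM (what is proved, stated in full; the proofs are below) =====
def Claim_equal_shorten_bact_names : Prop := ∀ (bacterias : List String), Dom_shorten_bact_names bacterias → Spec_shorten_bact_names bacterias (shorten_bact_names bacterias)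

-- ===== LEMMAS AND PROOFS =====

-- the "bad short name" test, as a Bool
def pbad (x : String) : Bool := decide (x = "k__Bacteria" ∨ x = "Unassigned")

-- positions (from s) of the bad elements, in increasing order
def badIdxP {α : Type} (p : α → Bool) (s : Int) : List α → List Int
  | [] => []
  | x :: l => (if p x then [s] else []) ++ badIdxP p (s + 1) l

lemma enum_fold {α : Type} (p : α → Bool) :
    ∀ (l : List α) (s : Int) (acc : List Int),
      (PySem.List.enumerate l s).foldl
          (fun acc ib => if p ib.2 then acc ++ [ib.1] else acc) acc
        = acc ++ badIdxP p s l := by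
  intro l
  induction l with
  | nil => simp [badIdxP, PySem.List.enumerate]
  | cons x l ih =>
      intro s acc
      rw [PySem.List.enumerate_cons]
      simp only [List.foldl_cons, badIdxP]
      by_cases h : p x = true
      · simp [h, ih]
      · simp [h, ih]

lemma badIdxP_shift {α : Type} (p : α → Bool) :
    ∀ (l : List α) (s : Int), badIdxP p (s + 1) l = (badIdxP p s l).map (· + 1) := by
  intro l
  induction l with
  | nil => simp [badIdxP]
  | cons x l ih =>
      intro s
      simp only [badIdxP, List.map_append, ih]
      by_cases h : p x = true <;> simp [h]

lemma badIdxP_nonneg {α : Type} (p : α → Bool) :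
    ∀ (l : List α) (s x : Int), x ∈ badIdxP p s l → s ≤ x := by
  intro l
  induction l with
  | nil => simp [badIdxP]
  | cons y l ih =>
      intro s x hx
      simp only [badIdxP, List.mem_append] at hx
      rcases hx with hx | hx
      · by_cases h : p y = true <;> simp [h] at hx; omega
      · have := ih (s + 1) x hx; omega

lemma badIdxP_map {α β : Type} (p : β → Bool) (f : α → β) :
    ∀ (l : List α) (s : Int), badIdxP p s (l.map f) = badIdxP (fun x => p (f x)) s l := by
  intro l
  induction l with
  | nil => simp [badIdxP]
  | cons x l ih => intro s; simp [badIdxP, ih]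

lemma badIdxP_nil {α : Type} (p : α → Bool) :
    ∀ (l : List α) (s : Int), badIdxP p s l = [] → ∀ x ∈ l, p x = false := by
  intro l
  induction l with
  | nil => simp
  | cons y l ih =>
      intro s h x hx
      simp only [badIdxP] at h
      by_cases hy : p y = true
      · simp [hy] at h
      · rcases List.mem_cons.1 hx with rfl | hx
        · simpa using hy
        · simp [hy] at h; exact ih (s + 1) h x hx

lemma popStep_cons_succ {α : Type} (x : α) (l : List α) (j : Int) (hj : 0 ≤ j) :
    popStep (x :: l) (j + 1) = x :: popStep l j := by
  obtain ⟨m, rfl⟩ : ∃ m : Nat, j = (m : Int) := ⟨j.toNat, by omega⟩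
  by_cases hm : m < l.length
  · have h1 : m + 1 < (x :: l).length := by simpa using Nat.succ_lt_succ hm
    have e1 : ((m : Int) + 1) = ((m + 1 : Nat) : Int) := by push_cast; ring
    rw [e1, popStep, popStep, PySem.List.pop?_natCast _ _ h1, PySem.List.pop?_natCast _ _ hm]
    simp [List.eraseIdx_cons_succ]
  · have e1 : ((m : Int) + 1) = ((m + 1 : Nat) : Int) := by push_cast; ring
    rw [e1, popStep, popStep]
    have h1 : PySem.List.pop? (x :: l) (((m + 1 : Nat) : Int)) = none := by
      unfold PySem.List.pop? PySem.List.pyIdx?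
      rw [if_pos (by positivity), if_neg (by simp only [List.length_cons]; push_cast; omega)]
      rfl
    have h2 : PySem.List.pop? l (((m : Nat) : Int)) = none := by
      unfold PySem.List.pop? PySem.List.pyIdx?
      rw [if_pos (by positivity), if_neg (by omega)]
      rfl
    rw [h1, h2]

lemma foldl_popStep_shift {α : Type} :
    ∀ (J : List Int) (x : α) (l : List α), (∀ j ∈ J, 0 ≤ j) →
      List.foldl popStep (x :: l) (J.map (· + 1)) = x :: List.foldl popStep l J := by
  intro J
  induction J with
  | nil => simp
  | cons j J ih =>
      intro x l hJ
      simp only [List.map_cons, List.foldl_cons]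
      rw [popStep_cons_succ x l j (hJ j (by simp))]
      exact ih x _ (fun j' hj' => hJ j' (by simp [hj']))

lemma pop_filterP {α : Type} (p : α → Bool) :
    ∀ (l : List α), List.foldl popStep l (badIdxP p 0 l).reverse = l.filter (fun x => !p x) := by
  intro l
  induction l with
  | nil => simp [badIdxP]
  | cons x l ih =>
      have hz : (0 : Int) = 0 + 0 := by ring
      simp only [badIdxP]
      rw [show badIdxP p (0 + 1) l = (badIdxP p 0 l).map (· + 1) from badIdxP_shift p l 0]
      rw [List.reverse_append, ← List.map_reverse, List.foldl_append]
      rw [foldl_popStep_shift _ x l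
        (fun j hj => badIdxP_nonneg p l 0 j (by simpa using hj))]
      rw [ih]
      by_cases h : p x = true
      · simp [h, popStep, PySem.List.pop?_zero_cons]
      · simp [h]

-- the while-scan returns the index of the first meaningful part from the end,
-- falling back to the first part
lemma loop_find (parts : List String) :
    ∀ (k i : Nat), 1 ≤ i → i ≤ parts.length → parts.length - i = k →
      PySem.List.pyGetD parts (-(shortenLoopA parts i : Int)) "" =
      findMeaningful (PySem.List.pyGetD parts 0 "") (parts.reverse.drop (i - 1)) := by
  intro k
  induction k with
  | zero =>
      intro i h1 h2 hk
      have hi : i = parts.length := by omega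
      have hlen : 0 < parts.length := by omega
      have hget : PySem.List.pyGetD parts (-(i : Int)) "" = parts[parts.length - i] :=
        PySem.List.pyGetD_neg_natCast parts i "" (by omega) h2
      have hdrop : parts.reverse.drop (i - 1) = [parts[parts.length - i]] := by
        have h3 : i - 1 < parts.reverse.length := by simp; omega
        rw [← List.getElem_cons_drop h3]
        have : parts.reverse.drop (i - 1 + 1) = [] := by
          apply List.drop_eq_nil_of_le; simp; omega
        rw [this, List.getElem_reverse]
        congr 2
        omega
      rw [shortenLoopA]
      by_cases hc : PySem.Str.len (PySem.List.pyGetD parts (-(i : Int)) "") < 3 ∨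
          PySem.List.pyGetD parts (-(i : Int)) "" = "Unassigned" ∨
          PySem.List.pyGetD parts (-(i : Int)) "" = "NA"
      · rw [if_pos hc, if_pos (by omega)]
        rw [hget] at hc ⊢
        rw [hdrop, findMeaningful]
        rw [if_neg (by rintro ⟨ha, hb, hcc⟩; rcases hc with h | h | h <;> [omega; exact hb h; exact hcc h])]
        have e0 : parts.length - i = 0 := by omega
        simp only [e0]
        rw [findMeaningful, PySem.List.pyGetD_zero, List.getD_eq_getElem _ _ hlen]
      · rw [if_neg hc, hget, hdrop, findMeaningful]
        rw [if_pos (by rw [hget] at hc; push Not at hc; exact ⟨by omega, hc.2.1, hc.2.2⟩)]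
  | succ k ih =>
      intro i h1 h2 hk
      have hget : PySem.List.pyGetD parts (-(i : Int)) "" = parts[parts.length - i] :=
        PySem.List.pyGetD_neg_natCast parts i "" (by omega) h2
      have h3 : i - 1 < parts.reverse.length := by simp; omega
      have hdrop : parts.reverse.drop (i - 1) =
          parts[parts.length - i] :: parts.reverse.drop i := by
        rw [← List.getElem_cons_drop h3, List.getElem_reverse]
        have e2 : i - 1 + 1 = i := by omega
        have e3 : parts.length - 1 - (i - 1) = parts.length - i := by omega
        simp only [e2, e3]
      rw [shortenLoopA]
      by_cases hc : PySem.Str.len (PySem.List.pyGetD parts (-(i : Int)) "") < 3 ∨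
          PySem.List.pyGetD parts (-(i : Int)) "" = "Unassigned" ∨
          PySem.List.pyGetD parts (-(i : Int)) "" = "NA"
      · rw [if_pos hc, if_neg (by omega)]
        rw [hget] at hc
        rw [hdrop, findMeaningful]
        rw [if_neg (by rintro ⟨ha, hb, hcc⟩; rcases hc with h | h | h <;> [omega; exact hb h; exact hcc h])]
        have := ih (i + 1) (by omega) (by omega) (by omega)
        rw [show i + 1 - 1 = i from rfl] at this
        exact this
      · rw [if_neg hc, hget, hdrop, findMeaningful]
        rw [if_pos (by rw [hget] at hc; push Not at hc; exact ⟨by omega, hc.2.1, hc.2.2⟩)]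

lemma shortName_eq (f : String) : shortNameA f = shortNameB f := by
  simp only [shortNameA, shortNameB]
  generalize (PySem.Str.split? f ";").getD [] = parts
  cases parts with
  | nil =>
      have h1 : shortenLoopA ([] : List String) 1 = 1 := by
        rw [shortenLoopA]
        simp [PySem.List.pyGetD, PySem.List.pyGet?, PySem.List.pyIdx?, PySem.Str.len]
      rw [h1]
      simp [findMeaningful, PySem.List.pyGetD, PySem.List.pyGet?, PySem.List.pyIdx?]
  | cons x l =>
      congr 1
      simpa using loop_find (x :: l) ((x :: l).length - 1) 1 (by omega) (by simp) rfl

-- B's fold builds the two filtered lists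
lemma alt_fold :
    ∀ (l : List String) (s k : List String),
      l.foldl
          (fun acc f =>
            let name := shortNameB f
            if name = "k__Bacteria" ∨ name = "Unassigned" then acc
            else (acc.1 ++ [name], acc.2 ++ [f])) (s, k)
        = (s ++ ((l.filter fun f => !pbad (shortNameB f)).map shortNameB),
           k ++ (l.filter fun f => !pbad (shortNameB f))) := by
  intro l
  induction l with
  | nil => simp
  | cons x l ih =>
      intro s k
      simp only [List.foldl_cons, List.filter_cons]
      by_cases h : shortNameB x = "k__Bacteria" ∨ shortNameB x = "Unassigned"
      · have hb : pbad (shortNameB x) = true := by unfold pbad; exact decide_eq_true h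
        rw [if_pos h, hb]
        simp only [Bool.not_true]
        rw [if_neg (by simp)]
        exact ih s k
      · have hb : pbad (shortNameB x) = false := by unfold pbad; exact decide_eq_false h
        rw [if_neg h, hb]
        simp only [Bool.not_false]
        rw [if_pos trivial, ih]
        simp

-- ===== VERDICT (by name: the statement is the Claim_ definition above) =====
theorem shorten_bact_names_spec : Claim_equal_shorten_bact_names := by
  intro l _
  unfold Spec_shorten_bact_names
  rw [shorten_bact_names, shorten_bact_names_alt]
  simp only [PySem.List.foldl_append_singleton_eq_map, List.nil_append]
  rw [List.map_congr_left (fun f _ => shortName_eq f)]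
  rw [alt_fold l [] []]
  simp only [List.nil_append]
  rw [show ∀ acc, (PySem.List.enumerate (l.map shortNameB) 0).foldl
        (fun acc ib => if ib.2 = "k__Bacteria" ∨ ib.2 = "Unassigned" then acc ++ [ib.1] else acc) acc
        = acc ++ badIdxP pbad 0 (l.map shortNameB) from fun acc => by
      have := enum_fold pbad (l.map shortNameB) 0 acc
      simpa [pbad] using this]
  simp only [List.nil_append]
  by_cases hk : badIdxP pbad 0 (l.map shortNameB) = []
  · rw [if_neg (by simp [hk])]
    have hall : ∀ x ∈ l.map shortNameB, pbad x = false := badIdxP_nil pbad _ 0 hk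
    have hfil : (l.filter fun f => !pbad (shortNameB f)) = l := by
      apply List.filter_eq_self.2
      intro f hf
      simp [hall (shortNameB f) (List.mem_map_of_mem hf)]
    rw [hfil]
  · rw [if_pos hk]
    rw [pop_idx]
    simp only [List.map_cons, List.map_nil]
    rw [pop_filterP pbad (l.map shortNameB)]
    rw [show badIdxP pbad 0 (l.map shortNameB) = badIdxP (fun f => pbad (shortNameB f)) 0 l from
      badIdxP_map pbad shortNameB l 0]
    rw [pop_filterP (fun f => pbad (shortNameB f)) l]
    rw [List.filter_map, Function.comp_def]
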